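-- pv_equiv track=rewrite | github.com/KristineGray/scrabble-scorer-python | scrabble_scorer.py | vowel_bonus_scorer
-- ===== SOURCE A (Python) =====
-- def vowel_bonus_scorer(word):
--     VOWELS = 'AEIOU'
--     score = 0
--     for char in word.upper():
--         if char in VOWELS:
--             score += 3
--         else:
--             score += 1
--     return score
-- ===== SOURCE B (Python) =====
-- def vowel_bonus_scorer(word):
--     bonus = 0
--     for v in 'aeiouAEIOU':
--         bonus += word.count(v)
--     return len(word) + 2 * bonus
-- ===== Notes on version B (the rewrite author's own statement) =====
-- stated objective: faster
-- what changed: B never uppercases or tests each character in Python: it makes one str.count scan per vowel letter (both cases) and derives the score arithmetically as len(word) + 2*bonus, instead of accumulating 3-or-1 per character of word.upper().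
import Mathlib
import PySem

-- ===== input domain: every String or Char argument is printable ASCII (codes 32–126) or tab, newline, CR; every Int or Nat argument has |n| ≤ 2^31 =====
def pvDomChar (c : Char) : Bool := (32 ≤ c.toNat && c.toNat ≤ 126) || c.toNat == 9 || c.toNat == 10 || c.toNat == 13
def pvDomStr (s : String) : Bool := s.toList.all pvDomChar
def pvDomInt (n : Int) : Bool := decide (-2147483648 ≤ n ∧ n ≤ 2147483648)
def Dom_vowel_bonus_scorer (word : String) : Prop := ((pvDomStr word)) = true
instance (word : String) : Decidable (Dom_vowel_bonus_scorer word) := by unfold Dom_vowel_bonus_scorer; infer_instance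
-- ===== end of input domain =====

-- B never uppercases or tests each character: it makes one word.count scan per vowel letter
-- (both cases) and combines the ten counts arithmetically as len(word) + 2*bonus.

-- ===== PORT A =====
-- score = 0; for char in word.upper(): score += 3 if char in 'AEIOU' else 1; return score
def vowel_bonus_scorer (word : String) : Int :=
  (PySem.Str.upper word).toList.foldl
    (fun score char => if "AEIOU".toList.contains char then score + 3 else score + 1) 0

-- ===== PORT B =====
-- bonus = 0; for v in 'aeiouAEIOU': bonus += word.count(v); return len(word) + 2 * bonus
def vowel_bonus_scorer_alt (word : String) : Int :=
  let bonus : Int :=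
    "aeiouAEIOU".toList.foldl
      (fun bonus v => bonus + (PySem.Str.count word (String.ofList [v]) : Int)) 0
  PySem.Str.len word + 2 * bonus

-- ===== PRECONDITION & SPEC =====
def Spec_vowel_bonus_scorer (word : String) (out : Int) : Prop := out = vowel_bonus_scorer_alt word
instance (word : String) (out : Int) : Decidable (Spec_vowel_bonus_scorer word out) := by unfold Spec_vowel_bonus_scorer; infer_instance

-- ===== CLAIM (what is proved, stated in full; the proofs are below) =====
def Claim_equal_vowel_bonus_scorer : Prop := ∀ (word : String), Dom_vowel_bonus_scorer word → Spec_vowel_bonus_scorer word (vowel_bonus_scorer word)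

-- ===== LEMMAS AND PROOFS =====

-- A's accumulation: 3-or-1 per uppercased char = length + 2 * (number of vowel chars).
lemma vbs_fold (l : List Char) (acc : Int) :
    l.foldl (fun score char => if ['A','E','I','O','U'].contains char then score + 3 else score + 1) acc
      = acc + l.length + 2 * (l.countP (fun c => ['A','E','I','O','U'].contains c) : Nat) := by
  induction l generalizing acc with
  | nil => simp
  | cons c t ih =>
    rw [List.foldl_cons, List.countP_cons, List.length_cons]
    by_cases h : (['A','E','I','O','U'] : List Char).contains c = true
    · rw [if_pos h, if_pos h, ih]; push_cast; ring
    · rw [if_neg h, if_neg h, ih]; push_cast; ring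

-- Python str.count of a single-character needle counts that character's occurrences.
lemma count_go_single (v : Char) (l : List Char) (fuel acc : Nat) (h : l.length ≤ fuel) :
    PySem.Chars.count.go [v] fuel l acc = acc + l.count v := by
  induction l generalizing fuel acc with
  | nil => rw [PySem.Chars.count.go.eq_def]; cases fuel <;> simp
  | cons c t ih =>
    cases fuel with
    | zero => simp at h
    | succ f =>
      rw [PySem.Chars.count.go.eq_def]
      simp only [List.isPrefixOf, List.length_cons] at *
      by_cases hvc : v == c
      · simp only [hvc, Bool.true_and, if_pos, List.length_nil,
          Nat.zero_add, List.drop_one, List.tail_cons]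
        rw [ih _ _ (by omega)]
        have : c = v := (beq_iff_eq.mp hvc).symm
        simp [this]
        omega
      · simp only [hvc, Bool.false_and, if_neg, Bool.false_eq_true, not_false_iff]
        rw [ih _ _ (by omega)]
        have : ¬ c = v := fun hh => by simp [hh] at hvc
        simp [this]

lemma count_single (l : List Char) (v : Char) : PySem.Chars.count l [v] = l.count v := by
  unfold PySem.Chars.count
  rw [if_neg (by simp), count_go_single v l l.length 0 (le_refl _)]
  omega

-- uppercasing preserves "is a vowel": upperChar c ∈ 'AEIOU' iff c ∈ 'aeiouAEIOU' (ASCII domain).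
lemma char_key (c : Char) (hd : pvDomChar c = true) :
    (['A','E','I','O','U'] : List Char).contains (PySem.Chars.upperChar c)
      = (['a','e','i','o','u','A','E','I','O','U'] : List Char).contains c := by
  have hc : Char.ofNat c.toNat = c := Char.ofNat_toNat c
  have hb : c.toNat ≤ 126 := by
    simp only [pvDomChar, Bool.or_eq_true, Bool.and_eq_true, decide_eq_true_eq, beq_iff_eq] at hd
    omega
  rw [← hc]
  set n := c.toNat with hn
  clear_value n
  interval_cases n <;> decide

-- the 0/1 indicator summed over the ten (distinct) vowel letters = a single membership test.
lemma indicator_sum (c : Char) :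
    ((['a','e','i','o','u','A','E','I','O','U'] : List Char).map (fun v => if c = v then (1 : Int) else 0)).sum
      = if (['a','e','i','o','u','A','E','I','O','U'] : List Char).contains c then (1 : Int) else 0 := by
  by_cases h : (['a','e','i','o','u','A','E','I','O','U'] : List Char).contains c = true
  · rw [if_pos h]
    have hm : c ∈ (['a','e','i','o','u','A','E','I','O','U'] : List Char) := by simpa using h
    fin_cases hm <;> decide
  · rw [if_neg (by simpa using h)]
    have hm : c ∉ (['a','e','i','o','u','A','E','I','O','U'] : List Char) := by simpa using h
    simp only [List.mem_cons, List.not_mem_nil, or_false, not_or] at hm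
    obtain ⟨h1,h2,h3,h4,h5,h6,h7,h8,h9,h10⟩ := hm
    simp [h1,h2,h3,h4,h5,h6,h7,h8,h9,h10]

-- the double-counting exchange: vowels among upper(w) = Σ over the vowel letters of their count in w.
lemma exchange (w : List Char) (hd : ∀ c ∈ w, pvDomChar c = true) :
    ((w.map PySem.Chars.upperChar).countP (fun c => ['A','E','I','O','U'].contains c) : Int)
      = ((['a','e','i','o','u','A','E','I','O','U'] : List Char).map (fun v => (w.count v : Int))).sum := by
  induction w with
  | nil => simp
  | cons c t ih =>
    have hdc := hd c (List.mem_cons_self)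
    have iht := ih (fun x hx => hd x (List.mem_cons_of_mem _ hx))
    rw [List.map_cons, List.countP_cons]
    push_cast
    rw [iht, char_key c hdc]
    have hcnt : ((['a','e','i','o','u','A','E','I','O','U'] : List Char).map (fun v => ((c :: t).count v : Int)))
        = ((['a','e','i','o','u','A','E','I','O','U'] : List Char).map (fun v => (t.count v : Int) + if c = v then (1:Int) else 0)) := by
      apply List.map_congr_left
      intro v _
      rw [List.count_cons]
      push_cast
      congr 1
      by_cases h : c = v
      · simp [h]
      · have h' : ¬ v = c := fun hh => h hh.symm
        simp only [beq_iff_eq, if_neg h', if_neg h]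
    rw [hcnt, PySem.List.sum_map_add_int, indicator_sum]

-- ===== VERDICT (by name: the statement is the Claim_ definition above) =====
theorem vowel_bonus_scorer_spec : Claim_equal_vowel_bonus_scorer := by
  intro word hdom
  unfold Spec_vowel_bonus_scorer vowel_bonus_scorer vowel_bonus_scorer_alt
  have hA : "AEIOU".toList = (['A','E','I','O','U'] : List Char) := by decide
  have hV : "aeiouAEIOU".toList = (['a','e','i','o','u','A','E','I','O','U'] : List Char) := by decide
  rw [hA, hV]
  have hup : (PySem.Str.upper word).toList = word.toList.map PySem.Chars.upperChar := by
    simp [PySem.Chars.upper]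
  rw [hup, vbs_fold]
  have hfn : (fun (bonus : Int) (v : Char) => bonus + (PySem.Str.count word (String.ofList [v]) : Int))
      = fun (bonus : Int) (v : Char) => bonus + (word.toList.count v : Int) := by
    funext b v
    have : PySem.Str.count word (String.ofList [v]) = word.toList.count v := by
      rw [PySem.Str.count_eq]
      have : (String.ofList [v]).toList = [v] := by simp
      rw [this, count_single]
    rw [this]
  rw [hfn, PySem.List.foldl_add (g := fun v => (word.toList.count v : Int))]
  have hdl : ∀ c ∈ word.toList, pvDomChar c = true := by
    have := hdom
    unfold Dom_vowel_bonus_scorer pvDomStr at this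
    exact fun c hc => List.all_eq_true.mp this c hc
  rw [← exchange word.toList hdl]
  simp only [PySem.Str.len_eq, List.length_map]
  ring
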